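-- pv_equiv track=rewrite | github.com/DCovenant/multi-rag-inforetreival-chatbot | rag_scripts/dataprocessing/utils/table_preserving_chunker.py | _get_overlap_paragraphs
-- ===== SOURCE A (Python) =====
-- from typing import List, Dict, Tuple, Optional
--
-- def _get_overlap_paragraphs(paragraphs: List[str], overlap_size: int) -> List[str]:
--     """Get last N paragraphs that fit in overlap size."""
--     overlap_paras = []
--     overlap_len = 0
--
--     for para in reversed(paragraphs):
--         if overlap_len + len(para) <= overlap_size:
--             overlap_paras.insert(0, para)
--             overlap_len += len(para)
--         else:
--             break
--
--     return overlap_paras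
-- ===== SOURCE B (Python) =====
-- def _get_overlap_paragraphs(paragraphs, overlap_size):
--     """Get last N paragraphs that fit in overlap size."""
--     # cumulative suffix lengths: cum[i] = total length of the last i+1 paragraphs
--     cum = []
--     total = 0
--     for p in reversed(paragraphs):
--         total += len(p)
--         cum.append(total)
--     # bisect-right for overlap_size in the nondecreasing cum table
--     lo, hi = 0, len(cum)
--     while lo < hi:
--         mid = (lo + hi) // 2
--         if cum[mid] <= overlap_size:
--             lo = mid + 1
--         else:
--             hi = mid
--     return paragraphs[len(paragraphs) - lo:]
-- ===== Notes on version B (the rewrite author's own statement) =====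
-- stated objective: alternative
-- what changed: Replaces the backward greedy loop that builds the result with insert(0,...) by building a cumulative suffix-length table once, binary-searching (bisect_right) for the cutoff count, and returning a single tail slice.
import Mathlib
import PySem

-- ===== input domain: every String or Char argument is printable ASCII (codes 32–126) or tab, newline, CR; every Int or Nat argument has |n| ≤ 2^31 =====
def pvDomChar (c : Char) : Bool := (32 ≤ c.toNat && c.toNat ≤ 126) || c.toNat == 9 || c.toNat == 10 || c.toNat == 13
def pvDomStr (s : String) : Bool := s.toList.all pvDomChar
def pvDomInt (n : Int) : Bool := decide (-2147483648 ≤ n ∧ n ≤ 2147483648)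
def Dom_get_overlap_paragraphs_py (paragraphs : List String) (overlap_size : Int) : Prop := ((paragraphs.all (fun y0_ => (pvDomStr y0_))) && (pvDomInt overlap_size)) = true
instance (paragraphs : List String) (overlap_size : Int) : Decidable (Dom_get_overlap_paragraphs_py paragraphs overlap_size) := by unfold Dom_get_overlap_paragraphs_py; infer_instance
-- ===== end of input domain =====

-- B replaces A's backward greedy loop (building the result with insert(0,...)) by a cumulative
-- suffix-length table, a bisect_right binary search for the cutoff count, and one tail slice.
-- Objective: alternative decomposition; same return value on every input (both are total).

-- ===== PORT A =====
-- A's loop over reversed(paragraphs): state = (overlap_paras, overlap_len); insert(0,p) = p :: acc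
def pvALoop (b : Int) : List String → List String → Int → List String
  | [], acc, _ => acc
  | p :: rest, acc, olen =>
    if olen + PySem.Str.len p ≤ b then pvALoop b rest (p :: acc) (olen + PySem.Str.len p)
    else acc

def get_overlap_paragraphs_py (paragraphs : List String) (overlap_size : Int) : List String :=
  pvALoop overlap_size paragraphs.reverse [] 0

-- ===== PORT B =====
-- cum table: cum.append(total) for each p in reversed(paragraphs)
def pvBCum (total : Int) : List String → List Int
  | [] => []
  | p :: rest => (total + PySem.Str.len p) :: pvBCum (total + PySem.Str.len p) rest

-- bisect_right loop: while lo < hi: mid = (lo+hi)//2; …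
def pvBsr (cum : List Int) (x : Int) (lo hi : Nat) : Nat :=
  if h : lo < hi then
    let mid := (lo + hi) / 2
    if cum.getD mid 0 ≤ x then pvBsr cum x (mid + 1) hi else pvBsr cum x lo mid
  else lo
termination_by hi - lo
decreasing_by all_goals omega

def get_overlap_paragraphs_py_alt (paragraphs : List String) (overlap_size : Int) : List String :=
  let cum := pvBCum 0 paragraphs.reverse
  let count := pvBsr cum overlap_size 0 cum.length
  PySem.List.slice paragraphs (some ((paragraphs.length - count : Nat) : Int)) none

-- ===== PRECONDITION & SPEC =====
def Spec_get_overlap_paragraphs_py (paragraphs : List String) (overlap_size : Int) (out : List String) : Prop := out = get_overlap_paragraphs_py_alt paragraphs overlap_size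
instance (paragraphs : List String) (overlap_size : Int) (out : List String) : Decidable (Spec_get_overlap_paragraphs_py paragraphs overlap_size out) := by unfold Spec_get_overlap_paragraphs_py; infer_instance

-- ===== CLAIM (what is proved, stated in full; the proofs are below) =====
def Claim_equal_get_overlap_paragraphs_py : Prop := ∀ (paragraphs : List String) (overlap_size : Int), Dom_get_overlap_paragraphs_py paragraphs overlap_size → Spec_get_overlap_paragraphs_py paragraphs overlap_size (get_overlap_paragraphs_py paragraphs overlap_size)

-- ===== LEMMAS AND PROOFS =====

-- greedy count: number of leading paragraphs of l (already reversed) A accepts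
def pvG (b : Int) (s : Int) : List String → Nat
  | [] => 0
  | p :: rest => if s + PySem.Str.len p ≤ b then pvG b (s + PySem.Str.len p) rest + 1 else 0

theorem pvALoop_eq (b : Int) (l : List String) : ∀ (acc : List String) (s : Int),
    pvALoop b l acc s = (l.take (pvG b s l)).reverse ++ acc := by
  induction l with
  | nil => intro acc s; simp [pvALoop, pvG]
  | cons p rest ih =>
    intro acc s
    by_cases h : s + PySem.Str.len p ≤ b
    · simp only [pvALoop, pvG, if_pos h, ih]
      simp
    · simp only [pvALoop, pvG, if_neg h]
      simp

theorem pvBCum_length (s : Int) (l : List String) : (pvBCum s l).length = l.length := by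
  induction l generalizing s with
  | nil => simp [pvBCum]
  | cons p rest ih => simp [pvBCum, ih]

theorem pvBCum_mem_ge (s : Int) (l : List String) : ∀ x ∈ pvBCum s l, s ≤ x := by
  induction l generalizing s with
  | nil => simp [pvBCum]
  | cons p rest ih =>
    intro x hx
    have hlen : 0 ≤ PySem.Str.len p := by
      simp [PySem.Str.len_eq]
    simp only [pvBCum, List.mem_cons] at hx
    rcases hx with rfl | hx
    · omega
    · have := ih (s + PySem.Str.len p) x hx; omega

theorem pvBCum_mono (s : Int) (l : List String) : ∀ i j : Nat, i ≤ j → j < l.length →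
    (pvBCum s l).getD i 0 ≤ (pvBCum s l).getD j 0 := by
  induction l generalizing s with
  | nil => intro i j _ hj; simp at hj
  | cons p rest ih =>
    intro i j hij hj
    match i, j with
    | 0, 0 => omega
    | 0, j + 1 =>
      simp only [pvBCum, List.getD_cons_zero, List.getD_cons_succ]
      have hjl : j < rest.length := by simpa using hj
      have hjl' : j < (pvBCum (s + PySem.Str.len p) rest).length := by
        rw [pvBCum_length]; exact hjl
      rw [List.getD_eq_getElem _ _ hjl']
      exact pvBCum_mem_ge _ _ _ (List.getElem_mem hjl')
    | i + 1, j + 1 =>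
      simp only [pvBCum, List.getD_cons_succ]
      exact ih (s + PySem.Str.len p) i j (by omega) (by simpa using hj)

-- the greedy count satisfies the bisect_right characterisation w.r.t. the cum table
theorem pvG_spec (b : Int) (s : Int) (l : List String) :
    (∀ i : Nat, i < pvG b s l → (pvBCum s l).getD i 0 ≤ b) ∧
    (pvG b s l < l.length → ¬ (pvBCum s l).getD (pvG b s l) 0 ≤ b) ∧
    pvG b s l ≤ l.length := by
  induction l generalizing s with
  | nil => simp [pvG]
  | cons p rest ih =>
    by_cases h : s + PySem.Str.len p ≤ b
    · obtain ⟨h1, h2, h3⟩ := ih (s + PySem.Str.len p)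
      refine ⟨?_, ?_, ?_⟩
      · intro i hi
        simp only [pvG, if_pos h] at hi
        match i with
        | 0 => simpa [pvBCum] using h
        | i + 1 =>
          simp only [pvBCum, List.getD_cons_succ]
          exact h1 i (by omega)
      · intro hlt
        simp only [pvG, if_pos h] at hlt ⊢
        simp only [pvBCum, List.getD_cons_succ]
        exact h2 (by simpa using hlt)
      · simp only [pvG, if_pos h]; simpa using h3
    · refine ⟨?_, ?_, ?_⟩
      · intro i hi
        simp only [pvG, if_neg h] at hi
        omega
      · intro _
        simp only [pvG, if_neg h, pvBCum, List.getD_cons_zero]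
        exact h
      · simp only [pvG, if_neg h]
        omega

-- bisect_right correctness (needs the table monotone on its length)
theorem pvBsr_spec (cum : List Int) (x : Int)
    (mono : ∀ i j : Nat, i ≤ j → j < cum.length → cum.getD i 0 ≤ cum.getD j 0) :
    ∀ (lo hi : Nat), lo ≤ hi → hi ≤ cum.length →
    (∀ i : Nat, i < lo → cum.getD i 0 ≤ x) →
    (∀ i : Nat, hi ≤ i → i < cum.length → ¬ cum.getD i 0 ≤ x) →
    (∀ i : Nat, i < pvBsr cum x lo hi → cum.getD i 0 ≤ x) ∧
    (pvBsr cum x lo hi < cum.length → ¬ cum.getD (pvBsr cum x lo hi) 0 ≤ x) ∧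
    pvBsr cum x lo hi ≤ cum.length := by
  intro lo hi
  induction hn : hi - lo using Nat.strong_induction_on generalizing lo hi with
  | _ n ih =>
  intro hlohi hhilen Hlo Hhi
  rw [pvBsr]
  by_cases h : lo < hi
  · simp only [dif_pos h]
    by_cases hm : cum.getD ((lo + hi) / 2) 0 ≤ x
    · simp only [if_pos hm]
      refine ih (hi - ((lo + hi) / 2 + 1)) (by omega) _ _ rfl (by omega) hhilen ?_ Hhi
      intro i hi'
      exact le_trans (mono i ((lo + hi) / 2) (by omega) (by omega)) hm
    · simp only [if_neg hm]
      refine ih ((lo + hi) / 2 - lo) (by omega) _ _ rfl (by omega) (by omega) Hlo ?_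
      intro i hi' hil hle
      exact hm (le_trans (mono ((lo + hi) / 2) i hi' hil) hle)
  · simp only [dif_neg h]
    have : lo = hi := by omega
    subst this
    exact ⟨Hlo, fun hlt => Hhi lo le_rfl hlt, hhilen⟩

-- two values satisfying the characterisation coincide
theorem pvUnique (cum : List Int) (x : Int) (r1 r2 : Nat)
    (h1a : ∀ i : Nat, i < r1 → cum.getD i 0 ≤ x) (h1b : r1 < cum.length → ¬ cum.getD r1 0 ≤ x)
    (h1c : r1 ≤ cum.length)
    (h2a : ∀ i : Nat, i < r2 → cum.getD i 0 ≤ x) (h2b : r2 < cum.length → ¬ cum.getD r2 0 ≤ x)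
    (h2c : r2 ≤ cum.length) : r1 = r2 := by
  by_contra hne
  rcases Nat.lt_or_ge r1 r2 with hlt | hge
  · exact h1b (by omega) (h2a r1 hlt)
  · have hlt : r2 < r1 := by omega
    exact h2b (by omega) (h1a r2 hlt)

-- ===== VERDICT (by name: the statement is the Claim_ definition above) =====
theorem get_overlap_paragraphs_py_spec : Claim_equal_get_overlap_paragraphs_py := by
  intro paragraphs overlap_size _
  unfold Spec_get_overlap_paragraphs_py get_overlap_paragraphs_py
  set rev := paragraphs.reverse with hrev
  set cum := pvBCum 0 rev with hcum
  have hclen : cum.length = rev.length := pvBCum_length 0 rev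
  have mono := pvBCum_mono 0 rev
  have mono' : ∀ i j : Nat, i ≤ j → j < cum.length → cum.getD i 0 ≤ cum.getD j 0 := by
    intro i j hij hj; exact mono i j hij (by omega)
  obtain ⟨g1, g2, g3⟩ := pvG_spec overlap_size 0 rev
  obtain ⟨b1, b2, b3⟩ := pvBsr_spec cum overlap_size mono' 0 cum.length (by omega) le_rfl
    (by omega) (by omega)
  have hkey : pvBsr cum overlap_size 0 cum.length = pvG overlap_size 0 rev := by
    apply pvUnique cum overlap_size _ _ b1 b2 b3 g1 ?_ (by omega)
    intro h; exact g2 (by omega)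
  have halt : get_overlap_paragraphs_py_alt paragraphs overlap_size =
      PySem.List.slice paragraphs
        (some ((paragraphs.length - pvBsr cum overlap_size 0 cum.length : Nat) : Int)) none := rfl
  rw [pvALoop_eq, halt, hkey, hrev, PySem.List.slice_from_natCast,
    List.take_reverse, List.reverse_reverse, List.append_nil]
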